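-- pv_equiv track=rewrite | github.com/aimagelab/TransFusion | permutations/weights_matcher.py | alternate_layers
-- ===== SOURCE A (Python) =====
-- def alternate_layers(num_layers):
--     """
--     Returns a list of layer indices in an alternating order (start, end, next, prev, ...).
--     Args:
--         num_layers (int): Number of layers.
--     Returns:
--         List[int]: Alternating order of indices.
--     """
--     all_layers = list(range(num_layers))
--     result = []
--
--     for i in range((num_layers + 1) // 2):
--         result.append(all_layers[i])
--         if i != num_layers - i - 1:
--             result.append(all_layers[-i - 1])
--
--     return result
-- ===== SOURCE B (Python) =====
-- def alternate_layers(num_layers):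
--     """Alternating order of layer indices, each position computed by a closed-form formula."""
--     return [j // 2 if j % 2 == 0 else num_layers - 1 - j // 2 for j in range(num_layers)]
-- ===== Notes on version B (the rewrite author's own statement) =====
-- stated objective: idiomatic
-- what changed: Replaces A's half-range pairing loop (two appends per iteration plus a midpoint equality check) with a single comprehension over all output positions, computing each element independently by a closed-form index formula.
import Mathlib
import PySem

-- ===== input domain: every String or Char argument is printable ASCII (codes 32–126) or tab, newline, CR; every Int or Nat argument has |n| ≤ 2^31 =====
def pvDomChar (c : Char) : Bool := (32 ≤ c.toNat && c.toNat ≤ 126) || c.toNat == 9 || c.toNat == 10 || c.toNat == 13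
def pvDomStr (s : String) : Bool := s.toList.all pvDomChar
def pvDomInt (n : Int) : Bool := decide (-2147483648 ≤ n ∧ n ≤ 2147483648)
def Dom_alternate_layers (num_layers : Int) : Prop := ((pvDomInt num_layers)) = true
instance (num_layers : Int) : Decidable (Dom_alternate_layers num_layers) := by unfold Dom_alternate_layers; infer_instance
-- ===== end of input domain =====

-- B replaces A's half-range pairing loop (two appends + midpoint check per iteration) with one map over all output positions using a closed-form index formula (same cost; idiomatic).


-- ===== PORT A =====
-- literal port of A: all_layers = list(range(num_layers)); loop i over range((num_layers+1)//2),
-- append all_layers[i] and, when i is not the middle index, all_layers[-i-1]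
def alternate_layers (num_layers : Int) : List Int :=
  let all_layers := PySem.List.pyRange 0 num_layers 1
  (PySem.List.pyRange 0 (PySem.Int.floordiv (num_layers + 1) 2) 1).foldl
    (fun result i =>
      let result := result ++ [PySem.List.pyGetD all_layers i 0]
      if i ≠ num_layers - i - 1 then
        result ++ [PySem.List.pyGetD all_layers (-i - 1) 0]
      else result)
    []

-- ===== PORT B =====
-- literal port of B: one comprehension over range(num_layers), closed-form value per position
def alternate_layers_alt (num_layers : Int) : List Int :=
  (PySem.List.pyRange 0 num_layers 1).map
    (fun j => if PySem.Int.mod j 2 = 0 then PySem.Int.floordiv j 2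
              else num_layers - 1 - PySem.Int.floordiv j 2)

-- ===== PRECONDITION & SPEC =====
def Spec_alternate_layers (num_layers : Int) (out : List Int) : Prop := out = alternate_layers_alt num_layers
instance (num_layers : Int) (out : List Int) : Decidable (Spec_alternate_layers num_layers out) := by unfold Spec_alternate_layers; infer_instance

-- ===== CLAIM (what is proved, stated in full; the proofs are below) =====
def Claim_equal_alternate_layers : Prop := ∀ (num_layers : Int), Dom_alternate_layers num_layers → Spec_alternate_layers num_layers (alternate_layers num_layers)

-- ===== LEMMAS AND PROOFS =====

-- the block A's loop iteration i contributes
def gA (k : Nat) (i : Nat) : List Int :=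
  (i : Int) :: (if (i : Int) ≠ (k : Int) - i - 1 then [(k : Int) - i - 1] else [])

-- B's per-position formula
def fB (k : Nat) (j : Nat) : Int :=
  if j % 2 = 0 then ((j / 2 : Nat) : Int) else (k : Int) - 1 - ((j / 2 : Nat) : Int)

-- Nat-indexed normal forms of the two results
def pvAspec (k : Nat) : List Int := (List.range ((k + 1) / 2)).flatMap (gA k)
def pvBspec (k : Nat) : List Int := (List.range k).map (fB k)

lemma gA_pair (k i : Nat) (h : 2 * i + 1 < k) : gA k i = [(i : Int), (k : Int) - i - 1] := by
  unfold gA; rw [if_pos (by omega)]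

lemma gA_mid (k i : Nat) (h : 2 * i + 1 = k) : gA k i = [(i : Int)] := by
  unfold gA; rw [if_neg (by simp only [ne_eq, not_not]; omega)]

lemma fB_even (k j : Nat) (h : j % 2 = 0) : fB k j = ((j / 2 : Nat) : Int) := by
  unfold fB; rw [if_pos h]

lemma fB_odd (k j : Nat) (h : j % 2 = 1) : fB k j = (k : Int) - 1 - ((j / 2 : Nat) : Int) := by
  unfold fB; rw [if_neg (by omega)]

-- loop invariant: m full pair-iterations of A produce the first 2*m positions of B
lemma pv_inv (k : Nat) : ∀ m : Nat, 2 * m ≤ k →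
    (List.range m).flatMap (gA k) = (List.range (2 * m)).map (fB k) := by
  intro m
  induction m with
  | zero => intro _; simp
  | succ m ih =>
    intro h
    rw [List.range_succ, List.flatMap_append, ih (by omega)]
    rw [show 2 * (m + 1) = (2 * m + 1) + 1 by ring, List.range_succ, List.map_append,
        List.range_succ, List.map_append, List.append_assoc]
    congr 1
    simp only [List.flatMap_cons, List.flatMap_nil, List.append_nil, List.map_cons,
      List.map_nil, gA_pair k m (by omega), fB_even k (2 * m) (by omega),
      fB_odd k (2 * m + 1) (by omega), List.cons_append, List.nil_append,
      List.cons.injEq, and_true]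
    all_goals omega

lemma pv_key (k : Nat) : pvAspec k = pvBspec k := by
  unfold pvAspec pvBspec
  rcases Nat.even_or_odd k with ⟨r, hr⟩ | ⟨r, hr⟩
  · subst hr
    have hm : (r + r + 1) / 2 = r := by omega
    rw [hm, pv_inv (r + r) r (by omega), two_mul]
  · subst hr
    have hm : (2 * r + 1 + 1) / 2 = r + 1 := by omega
    rw [hm, List.range_succ, List.flatMap_append, pv_inv (2 * r + 1) r (by omega),
        show List.range (2 * r + 1) = List.range (2 * r) ++ [2 * r] from List.range_succ,
        List.map_append]
    congr 1
    simp only [List.flatMap_cons, List.flatMap_nil, List.append_nil, List.map_cons,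
      List.map_nil, gA_mid (2 * r + 1) r (by omega), fB_even (2 * r + 1) (2 * r) (by omega),
      List.cons.injEq, and_true]
    all_goals omega

lemma pvA_eq (k : Nat) : alternate_layers (k : Int) = pvAspec k := by
  have hcast : ((k : Int) + 1) = ((k + 1 : Nat) : Int) := by push_cast; ring
  have h2 : (2 : Int) = ((2 : Nat) : Int) := by norm_num
  have hm : PySem.Int.floordiv ((k : Int) + 1) 2 = (((k + 1) / 2 : Nat) : Int) := by
    rw [hcast, h2, PySem.Int.floordiv_natCast]
  have hstep : ∀ (res : List Int) (i : Int),
      (if i ≠ (k : Int) - i - 1 then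
        (res ++ [PySem.List.pyGetD (List.map (fun c : Nat => (c : Int)) (List.range k)) i 0]) ++
          [PySem.List.pyGetD (List.map (fun c : Nat => (c : Int)) (List.range k)) (-i - 1) 0]
      else res ++ [PySem.List.pyGetD (List.map (fun c : Nat => (c : Int)) (List.range k)) i 0])
      = res ++ (PySem.List.pyGetD (List.map (fun c : Nat => (c : Int)) (List.range k)) i 0 ::
          (if i ≠ (k : Int) - i - 1 then
            [PySem.List.pyGetD (List.map (fun c : Nat => (c : Int)) (List.range k)) (-i - 1) 0]
          else [])) := by
    intro res i; split_ifs with hc <;> simp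
  simp only [alternate_layers, hm, PySem.List.pyRange_zero_nat, List.foldl_map]
  simp only [hstep]
  rw [PySem.List.foldl_append_eq_flatMap, List.nil_append]
  unfold pvAspec
  apply List.flatMap_congr
  intro t ht
  rw [List.mem_range] at ht
  unfold gA
  have htk : t < k := by omega
  congr 1
  · rw [PySem.List.pyGetD_natCast]
    simp [List.getD_eq_getElem?_getD, htk]
  · by_cases hc : (t : Int) ≠ (k : Int) - t - 1
    · rw [if_pos hc, if_pos hc]
      have hneg : (-(t : Int) - 1) = -(((t + 1 : Nat)) : Int) := by push_cast; ring
      rw [hneg, PySem.List.pyGetD_neg_natCast _ (t + 1) 0 (by omega)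
            (by simp only [List.length_map, List.length_range]; omega)]
      simp only [List.length_map, List.length_range, List.getElem_map, List.getElem_range,
        List.cons.injEq, and_true]
      omega
    · rw [if_neg hc, if_neg hc]

lemma pvB_eq (k : Nat) : alternate_layers_alt (k : Int) = pvBspec k := by
  unfold pvBspec
  simp only [alternate_layers_alt, PySem.List.pyRange_zero_nat, List.map_map]
  apply List.map_congr_left
  intro t _
  simp only [Function.comp_apply]
  unfold fB
  have h2 : (2 : Int) = ((2 : Nat) : Int) := by norm_num
  rw [h2, PySem.Int.mod_natCast, PySem.Int.floordiv_natCast]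
  by_cases hm : t % 2 = 0
  · rw [if_pos (show ((t % 2 : Nat) : Int) = 0 by exact_mod_cast hm), if_pos hm]
  · rw [if_neg (show ¬((t % 2 : Nat) : Int) = 0 by exact_mod_cast hm), if_neg hm]

-- ===== VERDICT (by name: the statement is the Claim_ definition above) =====
theorem alternate_layers_spec : Claim_equal_alternate_layers := by
  intro n _
  unfold Spec_alternate_layers
  by_cases h : n ≤ 0
  · have h1 : PySem.Int.floordiv (n + 1) 2 ≤ 0 := by
      rw [PySem.Int.floordiv_eq_ediv_of_pos (by norm_num)]; omega
    simp only [alternate_layers, alternate_layers_alt]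
    rw [PySem.List.pyRange_one_eq_nil h1, PySem.List.pyRange_one_eq_nil h]
    rfl
  · obtain ⟨k, hk⟩ : ∃ k : Nat, n = (k : Int) := ⟨n.toNat, (Int.toNat_of_nonneg (by omega)).symm⟩
    subst hk
    rw [pvA_eq, pvB_eq, pv_key]
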